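-- pv_equiv track=rewrite | github.com/samirpsalim/python-error-finder | project.py | lastline
-- ===== SOURCE A (Python) =====
-- def blanklength(t):
--     """
--     Returns the number of spaces in the beginning of the string t
--     """
--     ans=0#returns this number
--     if(len(t)!=0):#if t is not ""
--         while(t[ans]==" " and ans<len(t)-1):#as long as spaces keep on repeating and ans<index of last element
--             ans=ans+1
--         if(t[len(t)-1]==" "):#if last element is  a space
--             ans+=1
--     return ans
--
-- def lastline(l):
--     """
--     Returns the last line which contain anything other than a space if there exist such a line
--     ie, it's content and line number
--     """
--     i=0#keeps the loop running till the required line is found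
--     s=l[len(l)-1]#s is the string that will be returned assigning the last line
--     k=1#k is used to go to the previous line
--     while(i==0 and k<=len(l)):#as long as the required line is not found and the first line is not reached
--         if(blanklength(s)==len(s)):#if the line is full of blanks
--             k=k+1
--             s=l[len(l)-k]#going to the previous line
--         else:#if the required line is reached
--             i=1#breaking the loop
--     if(k!=len(l)+1):#if a line was found
--         return [s,len(l)-k]
-- ===== SOURCE B (Python) =====
-- def lastline(l):
--     """
--     Returns the last line which contain anything other than a space if there exist such a line
--     ie, it's content and line number
--     """
--     best = None
--     for i, line in enumerate(l):
--         if any(c != ' ' for c in line):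
--             best = [line, i]
--     return best
-- ===== Notes on version B (the rewrite author's own statement) =====
-- stated objective: simpler
-- what changed: Replaces the backward while-loop with its index arithmetic and the character-scanning blanklength helper by a single forward enumerate pass that remembers the last non-blank line.
import Mathlib
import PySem

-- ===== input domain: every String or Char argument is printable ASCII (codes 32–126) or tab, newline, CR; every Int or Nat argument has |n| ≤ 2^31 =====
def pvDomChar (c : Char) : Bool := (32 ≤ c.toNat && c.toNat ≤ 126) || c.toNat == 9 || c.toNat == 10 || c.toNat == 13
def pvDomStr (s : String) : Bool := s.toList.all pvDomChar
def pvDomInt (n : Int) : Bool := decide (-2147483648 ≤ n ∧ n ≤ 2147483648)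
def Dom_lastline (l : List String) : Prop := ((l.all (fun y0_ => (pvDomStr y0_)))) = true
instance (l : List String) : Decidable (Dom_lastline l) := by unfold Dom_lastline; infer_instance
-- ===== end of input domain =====

-- B replaces A's backward while-loop and blanklength helper by one forward pass remembering the last non-blank line (objective: simpler).

-- ===== PORT A =====
-- inner while of blanklength: while(t[ans]==" " and ans<len(t)-1): ans=ans+1
-- (t[ans] is always in range here — ans ≤ len-1 and len ≠ 0 at every call — so getD is exact)
def blLoop (cs : List Char) (ans : Nat) : Nat :=
  if _h : cs.getD ans ' ' = ' ' ∧ (ans : Int) < (cs.length : Int) - 1 then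
    blLoop cs (ans + 1)
  else ans
termination_by cs.length - ans
decreasing_by omega

def blanklength (t : String) : Int :=
  let cs := t.toList
  if cs.length ≠ 0 then
    let a := blLoop cs 0
    let a := if cs.getD (cs.length - 1) ' ' = ' ' then a + 1 else a
    (a : Int)
  else 0

-- while(i==0 and k<=len(l)): if blank: k+=1; s=l[len(l)-k] else: i=1 — returns the final (s,k);
-- none = the IndexError of l[len(l)-k] (unreachable for nonempty l)
def lloop (l : List String) (s : String) (k : Nat) : Option (String × Nat) :=
  if h : k ≤ l.length then
    if blanklength s = (PySem.Str.len s : Int) then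
      match PySem.List.pyGet? l ((l.length : Int) - ((k : Int) + 1)) with
      | none => none
      | some s' => lloop l s' (k + 1)
    else some (s, k)
  else some (s, k)
termination_by l.length + 1 - k
decreasing_by omega

def lastline (l : List String) : Option (String × Int) :=
  match PySem.List.pyGet? l ((l.length : Int) - 1) with
  | none => none          -- Python raises IndexError here (empty list); excluded by Pre_
  | some s0 =>
    match lloop l s0 1 with
    | none => none
    | some (s, k) => if k ≠ l.length + 1 then some (s, (l.length : Int) - (k : Int)) else none

-- ===== PORT B =====
def lastline_alt (l : List String) : Option (String × Int) :=
  (PySem.List.enumerate l).foldl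
    (fun best p => if p.2.toList.any (fun c => c != ' ') then some (p.2, p.1) else best)
    none

-- ===== PRECONDITION & SPEC =====
-- Pre_ excludes only the empty list, on which A raises IndexError (l[len(l)-1])
def Pre_lastline (l : List String) : Prop := l ≠ []
instance (l : List String) : Decidable (Pre_lastline l) := by unfold Pre_lastline; infer_instance
def pvWitness_lastline : List String := (["a", "  "])

def Spec_lastline (l : List String) (out : Option (String × Int)) : Prop := out = lastline_alt l
instance (l : List String) (out : Option (String × Int)) : Decidable (Spec_lastline l out) := by unfold Spec_lastline; infer_instance

-- ===== CLAIM =====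
def Claim_equal_lastline : Prop := ∀ (l : List String), Dom_lastline l → Pre_lastline l → Spec_lastline l (lastline l)

-- ===== LEMMAS AND PROOFS =====

-- "last non-blank so far", scanning right to left: characterises both programs
def gB : List (Int × String) → Option (String × Int)
  | [] => none
  | (i, s) :: rest => (gB rest).or (if s.toList.any (fun c => c != ' ') then some (s, i) else none)

theorem blLoop_spec (cs : List Char) (ans : Nat) (h : ans < cs.length) :
    ans ≤ blLoop cs ans ∧ blLoop cs ans < cs.length ∧
    (∀ j, ans ≤ j → j < blLoop cs ans → cs.getD j ' ' = ' ') ∧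
    (blLoop cs ans = cs.length - 1 ∨ cs.getD (blLoop cs ans) ' ' ≠ ' ') := by
  induction ans using blLoop.induct (cs := cs) with
  | case1 ans hcond ih =>
    rw [blLoop, dif_pos hcond]
    obtain ⟨h1, h2, h3, h4⟩ := ih (by omega)
    refine ⟨by omega, h2, ?_, h4⟩
    intro j hj1 hj2
    rcases Nat.eq_or_lt_of_le hj1 with rfl | hlt
    · exact hcond.1
    · exact h3 j hlt hj2
  | case2 ans hcond =>
    rw [blLoop, dif_neg hcond]
    push_neg at hcond
    by_cases hsp : cs.getD ans ' ' = ' '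
    · have := hcond hsp
      exact ⟨le_refl _, h, fun j hj1 hj2 => by omega, Or.inl (by omega)⟩
    · exact ⟨le_refl _, h, fun j hj1 hj2 => by omega, Or.inr hsp⟩

-- A's blank test (blanklength(s) == len(s)) holds exactly when the line has no non-space character
theorem blank_iff (s : String) :
    (blanklength s = (PySem.Str.len s : Int)) ↔ (s.toList.any (fun c => c != ' ')) = false := by
  have hlen : (PySem.Str.len s : Int) = (s.toList.length : Int) := by
    simp [PySem.Str.len_eq]
  rw [hlen]
  unfold blanklength
  simp only []
  have hall : (s.toList.any (fun c => c != ' ')) = false ↔ ∀ c ∈ s.toList, c = ' ' := by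
    simp [List.any_eq_false]
  rw [hall]
  by_cases hnil : s.toList.length ≠ 0
  · rw [if_pos hnil]
    obtain ⟨h1, h2, h3, h4⟩ := blLoop_spec s.toList 0 (by omega)
    constructor
    · intro heq
      -- cast back to Nat
      by_cases hlast : s.toList.getD (s.toList.length - 1) ' ' = ' '
      · rw [if_pos hlast] at heq
        have hv : blLoop s.toList 0 + 1 = s.toList.length := by exact_mod_cast heq
        intro c hc
        obtain ⟨j, hj, rfl⟩ := List.mem_iff_getElem.mp hc
        by_cases hj1 : j < blLoop s.toList 0
        · have := h3 j (by omega) hj1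
          rwa [List.getD_eq_getElem _ _ hj] at this
        · have : j = s.toList.length - 1 := by omega
          subst this
          rwa [List.getD_eq_getElem _ _ hj] at hlast
      · rw [if_neg hlast] at heq
        have : blLoop s.toList 0 = s.toList.length := by exact_mod_cast heq
        omega
    · intro hsp
      have hlast : s.toList.getD (s.toList.length - 1) ' ' = ' ' := by
        rw [List.getD_eq_getElem _ _ (by omega)]
        exact hsp _ (List.getElem_mem _)
      rw [if_pos hlast]
      have hr : blLoop s.toList 0 = s.toList.length - 1 := by
        rcases h4 with h4 | h4
        · exact h4
        · exfalso; apply h4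
          rw [List.getD_eq_getElem _ _ h2]
          exact hsp _ (List.getElem_mem _)
      rw [hr]
      push_cast
      omega
  · rw [if_neg hnil]
    push_neg at hnil
    have : s.toList = [] := List.eq_nil_of_length_eq_zero hnil
    simp [this]

theorem gB_append (as bs : List (Int × String)) : gB (as ++ bs) = (gB bs).or (gB as) := by
  induction as with
  | nil => simp [gB]
  | cons p as ih =>
    obtain ⟨i, s⟩ := p
    simp [gB, ih, Option.or_assoc]

theorem foldl_eq_gB (ps : List (Int × String)) (b0 : Option (String × Int)) :
    ps.foldl (fun best p => if p.2.toList.any (fun c => c != ' ') then some (p.2, p.1) else best) b0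
      = (gB ps).or b0 := by
  induction ps generalizing b0 with
  | nil => simp [gB]
  | cons p ps ih =>
    obtain ⟨i, s⟩ := p
    simp only [List.foldl_cons, ih, gB, Option.or_assoc]
    congr 1
    by_cases h : s.toList.any (fun c => c != ' ') = true <;> simp [h]

theorem enumerate_append (as bs : List String) (s : Int) :
    PySem.List.enumerate (as ++ bs) s
      = PySem.List.enumerate as s ++ PySem.List.enumerate bs (s + as.length) := by
  induction as generalizing s with
  | nil => simp [PySem.List.enumerate_nil]
  | cons a as ih =>
    simp [PySem.List.enumerate_cons, ih]
    ring_nf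

-- A's loop started at index j scans j, j-1, …, 0 and (after A's post-processing) yields
-- exactly the "last non-blank" of the prefix l[0..j]
theorem Aloop_char (l : List String) (j : Nat) (hj : j < l.length) :
    (match lloop l (l.getD j "") (l.length - j) with
     | none => none
     | some (s, k) => if k ≠ l.length + 1 then some (s, (l.length : Int) - (k : Int)) else none)
      = gB (PySem.List.enumerate (l.take (j + 1)) 0) := by
  induction j with
  | zero =>
    have htake : l.take 1 = [l[0]] := by
      cases l with
      | nil => simp at hj
      | cons x xs => simp
    rw [htake]
    rw [lloop, dif_pos (by omega : l.length - 0 ≤ l.length)]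
    by_cases hb : blanklength (l.getD 0 "") = (PySem.Str.len (l.getD 0 "") : Int)
    · rw [if_pos hb]
      have hidx : (l.length : Int) - ((((l.length - 0 : Nat)) : Int) + 1) = -1 := by
        push_cast; omega
      rw [hidx, PySem.List.pyGet?_neg_one]
      obtain ⟨x, hx⟩ := Option.isSome_iff_exists.mp
        (List.getLast?_isSome.mpr (show l ≠ [] by intro h; subst h; simp at hj))
      rw [hx]
      have hloop : lloop l x (l.length - 0 + 1) = some (x, l.length - 0 + 1) := by
        rw [lloop.eq_def, dif_neg (by omega)]
      show (match lloop l x (l.length - 0 + 1) with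
            | none => (none : Option (String × Int))
            | some (s, k) => if k ≠ l.length + 1 then some (s, (l.length : Int) - (k : Int)) else none)
          = gB (PySem.List.enumerate [l[0]])
      rw [hloop]
      show (if l.length - 0 + 1 ≠ l.length + 1 then some (x, (l.length : Int) - ((l.length - 0 + 1 : Nat) : Int)) else none)
          = gB (PySem.List.enumerate [l[0]])
      rw [if_neg (by omega)]
      have hblank : (l[0].toList.any (fun c => c != ' ')) = false := by
        have := (blank_iff (l.getD 0 "")).mp hb
        rwa [List.getD_eq_getElem _ _ hj] at this
      simp [gB, hblank, PySem.List.enumerate_cons, PySem.List.enumerate_nil]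
    · rw [if_neg hb]
      have hnb : (l[0].toList.any (fun c => c != ' ')) = true := by
        have := (blank_iff (l.getD 0 "")).not.mp hb
        rw [List.getD_eq_getElem _ _ hj] at this
        simpa using this
      show (if l.length - 0 ≠ l.length + 1 then some (l.getD 0 "", (l.length : Int) - ((l.length - 0 : Nat) : Int)) else none)
          = gB (PySem.List.enumerate [l[0]])
      rw [if_pos (show l.length - 0 ≠ l.length + 1 by omega)]
      have h0 : (l.length : Int) - ((l.length - 0 : Nat) : Int) = 0 := by push_cast; omega
      rw [h0, List.getD_eq_getElem _ _ hj]
      simp [gB, hnb, PySem.List.enumerate_cons, PySem.List.enumerate_nil]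
  | succ j ih =>
    have hj' : j < l.length := by omega
    have htake : l.take (j + 2) = l.take (j + 1) ++ [l[j+1]] := by
      rw [List.take_add_one]
      simp [List.getElem?_eq_getElem hj]
    rw [htake, enumerate_append, gB_append]
    have hlen : (l.take (j+1)).length = j + 1 := by simp; omega
    rw [hlen]
    have henum1 : PySem.List.enumerate [l[j+1]] ((0 : Int) + (j+1 : Nat)) = [(((j+1 : Nat) : Int), l[j+1])] := by
      simp [PySem.List.enumerate_cons, PySem.List.enumerate_nil]
    rw [henum1]
    rw [lloop, dif_pos (by omega : l.length - (j+1) ≤ l.length)]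
    by_cases hb : blanklength (l.getD (j+1) "") = (PySem.Str.len (l.getD (j+1) "") : Int)
    · rw [if_pos hb]
      have hidx : (l.length : Int) - ((((l.length - (j+1) : Nat)) : Int) + 1) = ((j : Nat) : Int) := by
        push_cast; omega
      rw [hidx]
      have hget : PySem.List.pyGet? l ((j : Nat) : Int) = some (l.getD j "") := by
        rw [PySem.List.pyGet?_natCast]
        rw [List.getElem?_eq_getElem hj', List.getD_eq_getElem _ _ hj']
      rw [hget]
      have hstep : l.length - (j + 1) + 1 = l.length - j := by omega
      rw [hstep, ih hj']
      have hblank : (l[j+1].toList.any (fun c => c != ' ')) = false := by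
        have := (blank_iff (l.getD (j+1) "")).mp hb
        rwa [List.getD_eq_getElem _ _ hj] at this
      simp [gB, hblank]
    · rw [if_neg hb]
      have hnb : (l[j+1].toList.any (fun c => c != ' ')) = true := by
        have := (blank_iff (l.getD (j+1) "")).not.mp hb
        rw [List.getD_eq_getElem _ _ hj] at this
        simpa using this
      simp only [gB, Option.or_none]
      rw [List.getD_eq_getElem _ _ hj]
      simp [hnb]
      constructor
      · omega
      · push_cast; omega

-- ===== VERDICT =====
theorem lastline_spec : Claim_equal_lastline := by
  intro l _ hpre
  unfold Spec_lastline lastline lastline_alt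
  have hne : l ≠ [] := hpre
  have hlen : 0 < l.length := List.length_pos_iff.mpr hne
  have hidx : (l.length : Int) - 1 = ((l.length - 1 : Nat) : Int) := by push_cast; omega
  have hget : PySem.List.pyGet? l ((l.length : Int) - 1) = some (l.getD (l.length - 1) "") := by
    rw [hidx, PySem.List.pyGet?_natCast, List.getElem?_eq_getElem (by omega),
        List.getD_eq_getElem _ _ (by omega)]
  rw [hget]
  have h1 : l.length - (l.length - 1) = 1 := by omega
  have := Aloop_char l (l.length - 1) (by omega)
  rw [h1] at this
  have htake : l.take (l.length - 1 + 1) = l := by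
    rw [Nat.sub_add_cancel hlen]; exact List.take_length ..
  rw [htake] at this
  rw [foldl_eq_gB, Option.or_none, ← this]
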